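-- pv_equiv track=rewrite | github.com/biancarosa/hackerrank | revised-russian-roullete.py | revisedRussianRoulette
-- ===== SOURCE A (Python) =====
-- def revisedRussianRoulette(doors):
--     min = []
--     max = 0
--     for i in range(len(doors)):
--         if doors[i] == 1:
--             max = max + 1
--             if i-1 not in min:
--                 min.append(i)
--     return (len(min),max)
-- ===== SOURCE B (Python) =====
-- def revisedRussianRoulette(doors):
--     # Single pass over run lengths of consecutive 1s: each run of length L
--     # contributes ceil(L/2) = (L+1)//2 triggered doors; total = count of 1s.
--     total = doors.count(1)
--     triggered = 0
--     run = 0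
--     for d in doors:
--         if d == 1:
--             run += 1
--         else:
--             triggered += (run + 1) // 2
--             run = 0
--     triggered += (run + 1) // 2
--     return (triggered, total)
-- ===== Notes on version B (the rewrite author's own statement) =====
-- stated objective: simpler
-- what changed: Replaces A's growing list of appended indices with its 'i-1 not in min' membership scan by a single pass keeping only the current run length of consecutive ones, adding (run+1)//2 per run, plus doors.count(1) for the total.
import Mathlib
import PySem

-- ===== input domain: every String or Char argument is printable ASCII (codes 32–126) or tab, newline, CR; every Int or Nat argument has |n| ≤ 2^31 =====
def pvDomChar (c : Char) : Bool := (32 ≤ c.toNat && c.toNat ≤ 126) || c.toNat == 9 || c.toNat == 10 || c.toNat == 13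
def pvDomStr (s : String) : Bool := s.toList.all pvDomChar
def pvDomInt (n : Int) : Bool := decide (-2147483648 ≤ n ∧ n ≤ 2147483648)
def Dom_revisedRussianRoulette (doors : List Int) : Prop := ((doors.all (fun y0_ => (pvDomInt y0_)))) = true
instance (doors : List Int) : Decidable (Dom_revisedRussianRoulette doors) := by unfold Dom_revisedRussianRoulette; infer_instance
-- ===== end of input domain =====

-- B replaces A's index-list + membership scan by one run-length pass; return values proved equal.
-- B replaces A's index-list + membership scan by one run-length pass; return values proved equal.
-- ===== PORT A =====
-- loop body of A's for-loop (checks doors[i] == 1, appends i when i-1 not in min)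
def rrrStepA (doors : List Int) (s : List Int × Int) (i : Int) : List Int × Int :=
  if PySem.List.pyGetD doors i 0 = 1 then
    let mx := s.2 + 1
    if (i - 1) ∈ s.1 then (s.1, mx) else (s.1 ++ [i], mx)
  else s

def revisedRussianRoulette (doors : List Int) : Int × Int :=
  let st := (PySem.List.pyRange 0 (doors.length : Int)).foldl (rrrStepA doors) ([], 0)
  ((st.1.length : Int), st.2)

-- ===== PORT B =====
-- loop body of B's for-loop (extends the current run, or closes it adding (run+1)//2)
def rrrStepB (p : Int × Int) (d : Int) : Int × Int :=
  if d = 1 then (p.1, p.2 + 1) else (p.1 + PySem.Int.floordiv (p.2 + 1) 2, 0)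

def revisedRussianRoulette_alt (doors : List Int) : Int × Int :=
  let total : Int := (PySem.List.count doors 1 : Int)
  let p := doors.foldl rrrStepB (0, 0)
  (p.1 + PySem.Int.floordiv (p.2 + 1) 2, total)

-- ===== PRECONDITION & SPEC =====
def Spec_revisedRussianRoulette (doors : List Int) (out : Int × Int) : Prop := out = revisedRussianRoulette_alt doors
instance (doors : List Int) (out : Int × Int) : Decidable (Spec_revisedRussianRoulette doors out) := by unfold Spec_revisedRussianRoulette; infer_instance

-- ===== CLAIM (what is proved, stated in full; the proofs are below) =====
def Claim_equal_revisedRussianRoulette : Prop := ∀ (doors : List Int), Dom_revisedRussianRoulette doors → Spec_revisedRussianRoulette doors (revisedRussianRoulette doors)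

-- ===== LEMMAS AND PROOFS =====

-- Loop invariant: A's fold over indices k.. with state (min, max) matches B's fold over the
-- suffix with state (triggered, run): min.length = triggered + (run+1)//2, the previous index
-- is in min iff the current run length is odd, and max accumulates the count of ones.
theorem rrr_loop (doors : List Int) :
    ∀ (ds : List Int) (k : Nat) (mn : List Int) (mx t r : Int),
    doors.drop k = ds →
    (∀ j ∈ mn, j < (k : Int)) →
    (((k : Int) - 1 ∈ mn) ↔ r % 2 = 1) →
    0 ≤ r →
    (mn.length : Int) = t + PySem.Int.floordiv (r + 1) 2 →
    ((((PySem.List.pyRange (k : Int) (doors.length : Int)).foldl (rrrStepA doors) (mn, mx)).1.length : Int)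
        = (ds.foldl rrrStepB (t, r)).1
          + PySem.Int.floordiv ((ds.foldl rrrStepB (t, r)).2 + 1) 2)
    ∧ ((PySem.List.pyRange (k : Int) (doors.length : Int)).foldl (rrrStepA doors) (mn, mx)).2
        = mx + (PySem.List.count ds 1 : Int) := by
  intro ds
  induction ds with
  | nil =>
      intro k mn mx t r hdrop hlt hmem hr hlen
      have hk : doors.length ≤ k := by
        by_contra h
        have := congrArg List.length hdrop
        simp [List.length_drop] at this
        omega
      have hrange : PySem.List.pyRange (k : Int) (doors.length : Int) = [] := by
        simp [PySem.List.pyRange]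
        omega
      simp [hrange, PySem.List.count, hlen]
  | cons d ds ih =>
      intro k mn mx t r hdrop hlt hmem hr hlen
      have hk : k < doors.length := by
        by_contra h
        rw [List.drop_eq_nil_of_le (by omega)] at hdrop
        exact (List.cons_ne_nil d ds) hdrop.symm
      have hget : doors[k] = d := by
        have h0 : (doors.drop k)[0]'(by simp [hdrop]) = d := by simp [hdrop]
        simpa using h0
      have hdrop' : doors.drop (k + 1) = ds := by
        have h1 : (doors.drop k).drop 1 = doors.drop (k + 1) := List.drop_drop
        rw [hdrop] at h1
        simpa using h1.symm
      rw [PySem.List.pyRange_one_cons (by exact_mod_cast hk)]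
      simp only [List.foldl_cons]
      have hgetD : PySem.List.pyGetD doors (k : Int) 0 = d := by
        rw [PySem.List.pyGetD_eq_getElem doors 0 (by positivity) (by exact_mod_cast hk)]
        simpa using hget
      have hfd : ∀ a : Int, PySem.Int.floordiv a 2 = a / 2 := fun a =>
        PySem.Int.floordiv_eq_ediv_of_pos (by norm_num)
      have hcast : ((k : Int) + 1) = ((k + 1 : Nat) : Int) := by push_cast; ring
      by_cases hd : d = 1
      · subst hd
        by_cases hodd : r % 2 = 1
        · -- previous index was appended: k-1 ∈ min, do not append
          have hin : ((k : Int) - 1) ∈ mn := hmem.mpr hodd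
          rw [show rrrStepA doors (mn, mx) (k : Int) = (mn, mx + 1) from by
                simp [rrrStepA, hgetD, hin],
              show rrrStepB (t, r) 1 = (t, r + 1) from by simp [rrrStepB],
              hcast]
          have := ih (k + 1) mn (mx + 1) t (r + 1) hdrop'
            (fun j hj => by have := hlt j hj; push_cast; omega)
            (by constructor
                · intro hmem2
                  exfalso
                  have := hlt _ hmem2
                  push_cast at this
                  omega
                · intro h2; omega)
            (by omega)
            (by simp only [hfd] at hlen ⊢; omega)
          rcases this with ⟨h1, h2⟩
          refine ⟨h1, ?_⟩
          rw [h2]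
          simp [PySem.List.count]
          ring
        · -- previous index not appended: append k
          have hnin : ((k : Int) - 1) ∉ mn := fun h => hodd (hmem.mp h)
          rw [show rrrStepA doors (mn, mx) (k : Int) = (mn ++ [(k : Int)], mx + 1) from by
                simp [rrrStepA, hgetD, hnin],
              show rrrStepB (t, r) 1 = (t, r + 1) from by simp [rrrStepB],
              hcast]
          have := ih (k + 1) (mn ++ [(k : Int)]) (mx + 1) t (r + 1) hdrop'
            (fun j hj => by
              rcases List.mem_append.mp hj with h | h
              · have := hlt j h; push_cast; omega
              · simp at h; subst h; push_cast; omega)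
            (by
              have hkk : ((k + 1 : Nat) : Int) - 1 = (k : Int) := by push_cast; ring
              rw [hkk]
              constructor
              · intro _; omega
              · intro _; simp)
            (by omega)
            (by simp only [List.length_append, List.length_cons, List.length_nil]
                rw [hfd] at hlen
                rw [hfd]
                push_cast
                omega)
          rcases this with ⟨h1, h2⟩
          refine ⟨h1, ?_⟩
          rw [h2]
          simp [PySem.List.count]
          ring
      · -- d ≠ 1: the run breaks
        rw [show rrrStepA doors (mn, mx) (k : Int) = (mn, mx) from by
              simp [rrrStepA, hgetD, hd],
            show rrrStepB (t, r) d = (t + PySem.Int.floordiv (r + 1) 2, 0) from by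
              simp [rrrStepB, hd],
            hcast]
        have := ih (k + 1) mn mx (t + PySem.Int.floordiv (r + 1) 2) 0 hdrop'
          (fun j hj => by have := hlt j hj; push_cast; omega)
          (by constructor
              · intro hmem2
                exfalso
                have := hlt _ hmem2
                push_cast at this
                omega
              · intro h2; omega)
          (by omega)
          (by simp only [hfd] at hlen ⊢; omega)
        rcases this with ⟨h1, h2⟩
        refine ⟨h1, ?_⟩
        rw [h2]
        simp [PySem.List.count, hd]

-- ===== VERDICT (by name: the statement is the Claim_ definition above) =====
theorem revisedRussianRoulette_spec : Claim_equal_revisedRussianRoulette := by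
  intro doors _
  unfold Spec_revisedRussianRoulette revisedRussianRoulette revisedRussianRoulette_alt
  have h := rrr_loop doors doors 0 [] 0 0 0 (by simp) (by simp) (by simp) le_rfl (by simp [PySem.Int.floordiv])
  rcases h with ⟨h1, h2⟩
  simp only [Nat.cast_zero] at h1 h2
  exact Prod.ext (by simpa using h1) (by simpa using h2)
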